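-- pv_equiv track=rewrite | github.com/Mironika12/SPA-furniture-store | app.py | organize_products
-- ===== SOURCE A (Python) =====
-- def organize_products(entities, original_text):
--     """Organize extracted entities into product structures with full lines"""
--     products = []
--
--     lines = [line.strip() for line in original_text.split('\n') if line.strip()]
--
--     for entity, label, start_pos, end_pos in entities:
--         if label != "PRODUCT":
--             continue
--
--         for line in lines:
--             if entity in line:
--                 products.append({
--                     "entity": entity,
--                     "full_line": line
--                 })
--                 break
--
--     seen = set()
--     unique_products = []
--     for p in products:
--         if p['entity'] not in seen:
--             seen.add(p['entity'])
--             unique_products.append(p)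
--
--     return unique_products
-- ===== SOURCE B (Python) =====
-- def organize_products(entities, original_text):
--     """Organize extracted entities into product structures with full lines.
--     Staged: collect distinct product names, index lines once (line-outer scan),
--     then emit matched names in order."""
--     lines = [line.strip() for line in original_text.split('\n') if line.strip()]
--
--     names = []
--     for entity, label, start_pos, end_pos in entities:
--         if label == "PRODUCT" and entity not in names:
--             names.append(entity)
--
--     first_line = {}
--     for line in lines:
--         for n in names:
--             if n not in first_line and n in line:
--                 first_line[n] = line
--
--     return [{"entity": n, "full_line": first_line[n]} for n in names if n in first_line]
-- ===== Notes on version B (the rewrite author's own statement) =====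
-- stated objective: alternative
-- what changed: Inverted the traversal: instead of A's entity-outer scan over lines plus a separate dedup pass, B first collects the distinct PRODUCT names, then builds a name->first-containing-line index by a single line-outer sweep, and finally emits the matched names in order.
import Mathlib
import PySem

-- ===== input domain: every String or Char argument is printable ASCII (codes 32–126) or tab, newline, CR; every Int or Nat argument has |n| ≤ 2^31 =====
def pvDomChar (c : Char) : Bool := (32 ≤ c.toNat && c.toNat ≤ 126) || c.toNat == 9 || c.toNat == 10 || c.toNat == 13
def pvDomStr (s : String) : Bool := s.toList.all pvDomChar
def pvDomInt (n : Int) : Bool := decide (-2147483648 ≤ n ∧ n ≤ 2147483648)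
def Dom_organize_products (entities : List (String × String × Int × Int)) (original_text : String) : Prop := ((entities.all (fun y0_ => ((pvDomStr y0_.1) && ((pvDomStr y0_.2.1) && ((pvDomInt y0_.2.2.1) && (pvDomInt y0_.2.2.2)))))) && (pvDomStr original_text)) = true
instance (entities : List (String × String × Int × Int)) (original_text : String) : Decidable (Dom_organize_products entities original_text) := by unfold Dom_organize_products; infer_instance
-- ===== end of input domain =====

-- B inverts the traversal: it collects distinct PRODUCT names, indexes lines by a
-- single line-outer sweep into a name->first-line dict, then emits matched names in order.


-- ===== PORT A =====
-- lines = [line.strip() for line in original_text.split('\n') if line.strip()]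
def opLines (original_text : String) : List String :=
  ((PySem.Str.split? original_text "\n").getD []).filterMap  -- split? is some: sep "\n" ≠ ""
    (fun line => let s := PySem.Str.strip line; if s ≠ "" then some s else none)

-- the body of A's first loop (skip non-PRODUCT; scan lines, append first match, break)
def opStepA (lines : List String) (acc : List (List (String × String)))
    (e : String × String × Int × Int) : List (List (String × String)) :=
  if e.2.1 ≠ "PRODUCT" then acc
  else match lines.find? (fun line => PySem.Str.isIn e.1 line) with
    | some line => acc ++ [[("entity", e.1), ("full_line", line)]]
    | none => acc

-- the body of A's dedup loop over products (p['entity'] is always present)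
def opStepDedup (st : PySem.Set String × List (List (String × String)))
    (p : List (String × String)) : PySem.Set String × List (List (String × String)) :=
  let e := (PySem.Dict.get? (PySem.Dict.mk p) "entity").getD ""
  if PySem.Set.contains st.1 e then st
  else (PySem.Set.add st.1 e, st.2 ++ [p])

def organize_products (entities : List (String × String × Int × Int)) (original_text : String) : List (List (String × String)) :=
  ((entities.foldl (opStepA (opLines original_text)) []).foldl opStepDedup (PySem.Set.empty, [])).2

-- ===== PORT B =====
-- names: distinct PRODUCT entity names, in first-occurrence order
def opNameStep (ns : List String) (e : String × String × Int × Int) : List String :=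
  if e.2.1 == "PRODUCT" && !ns.contains e.1 then ns ++ [e.1] else ns

-- one line of the indexing sweep: record this line for every not-yet-indexed name it contains
def opIndexStep (names : List String) (d : PySem.Dict String String) (line : String) : PySem.Dict String String :=
  names.foldl (fun d n =>
    if (PySem.Dict.get? d n) = none ∧ PySem.Str.isIn n line then PySem.Dict.insert d n line else d) d

def organize_products_alt (entities : List (String × String × Int × Int)) (original_text : String) : List (List (String × String)) :=
  let lines := opLines original_text
  let names := entities.foldl opNameStep []
  let firstLine := lines.foldl (opIndexStep names) PySem.Dict.empty
  names.filterMap (fun n =>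
    (PySem.Dict.get? firstLine n).map (fun line => [("entity", n), ("full_line", line)]))

-- ===== PRECONDITION & SPEC =====
def Spec_organize_products (entities : List (String × String × Int × Int)) (original_text : String) (out : List (List (String × String))) : Prop := out = organize_products_alt entities original_text
instance (entities : List (String × String × Int × Int)) (original_text : String) (out : List (List (String × String))) : Decidable (Spec_organize_products entities original_text out) := by unfold Spec_organize_products; infer_instance

-- ===== CLAIM (what is proved, stated in full; the proofs are below) =====
def Claim_equal_organize_products : Prop := ∀ (entities : List (String × String × Int × Int)) (original_text : String), Dom_organize_products entities original_text → Spec_organize_products entities original_text (organize_products entities original_text)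

-- ===== LEMMAS AND PROOFS =====

-- what A's first loop appends for one entity
def opProd (lines : List String) (e : String × String × Int × Int) : List (List (String × String)) :=
  if e.2.1 ≠ "PRODUCT" then []
  else match lines.find? (fun line => PySem.Str.isIn e.1 line) with
    | some line => [[("entity", e.1), ("full_line", line)]]
    | none => []

theorem opStepA_eq_append (lines : List String) (acc : List (List (String × String)))
    (e : String × String × Int × Int) : opStepA lines acc e = acc ++ opProd lines e := by
  unfold opStepA opProd
  split_ifs with h
  · simp
  · cases lines.find? (fun line => PySem.Str.isIn e.1 line) <;> simp

theorem foldl_opStepA (lines : List String) (entities : List (String × String × Int × Int))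
    (acc : List (List (String × String))) :
    entities.foldl (opStepA lines) acc = acc ++ entities.flatMap (opProd lines) := by
  induction entities generalizing acc with
  | nil => simp
  | cons e rest ih =>
    simp only [List.foldl_cons, List.flatMap_cons, ih, opStepA_eq_append, List.append_assoc]

-- the fused single-pass form of A (proof intermediate between A's two passes and B)
def opFused (lines : List String) (st : PySem.Set String × List (List (String × String)))
    (e : String × String × Int × Int) : PySem.Set String × List (List (String × String)) :=
  if e.2.1 ≠ "PRODUCT" ∨ PySem.Set.contains st.1 e.1 then st
  else match lines.find? (fun line => PySem.Str.isIn e.1 line) with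
    | some line => (PySem.Set.add st.1 e.1, st.2 ++ [[("entity", e.1), ("full_line", line)]])
    | none => st

theorem dedup_step (lines : List String) (st : PySem.Set String × List (List (String × String)))
    (e : String × String × Int × Int) :
    (opProd lines e).foldl opStepDedup st = opFused lines st e := by
  unfold opProd opFused
  by_cases h : e.2.1 ≠ "PRODUCT"
  · simp [h]
  · cases hfind : lines.find? (fun line => PySem.Str.isIn e.1 line) with
    | none => simp [h]
    | some line => simp [h, opStepDedup, PySem.Dict.get?_mk_cons]

theorem dedup_eq_fused (lines : List String) (entities : List (String × String × Int × Int))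
    (st : PySem.Set String × List (List (String × String))) :
    (entities.flatMap (opProd lines)).foldl opStepDedup st = entities.foldl (opFused lines) st := by
  induction entities generalizing st with
  | nil => rfl
  | cons e rest ih =>
    simp only [List.flatMap_cons, List.foldl_append, List.foldl_cons, dedup_step, ih]

-- case lemmas for opFused
theorem opFused_skip (lines : List String) (st : PySem.Set String × List (List (String × String)))
    (e : String × String × Int × Int) (h : e.2.1 ≠ "PRODUCT" ∨ PySem.Set.contains st.1 e.1) :
    opFused lines st e = st := by
  unfold opFused; rw [if_pos h]

theorem opFused_found (lines : List String) (st : PySem.Set String × List (List (String × String)))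
    (e : String × String × Int × Int) (line : String)
    (hp : e.2.1 = "PRODUCT") (hS : e.1 ∉ st.1)
    (hf : lines.find? (fun line => PySem.Str.isIn e.1 line) = some line) :
    opFused lines st e = (PySem.Set.add st.1 e.1, st.2 ++ [[("entity", e.1), ("full_line", line)]]) := by
  unfold opFused
  rw [if_neg (by simp [hp, PySem.Set.contains, hS]), hf]

theorem opFused_none (lines : List String) (st : PySem.Set String × List (List (String × String)))
    (e : String × String × Int × Int)
    (hp : e.2.1 = "PRODUCT") (hS : e.1 ∉ st.1)
    (hf : lines.find? (fun line => PySem.Str.isIn e.1 line) = none) :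
    opFused lines st e = st := by
  unfold opFused
  rw [if_neg (by simp [hp, PySem.Set.contains, hS]), hf]

-- the deduplicated product-name list, with an explicit seen accumulator
def opNames (seen : List String) : List (String × String × Int × Int) → List String
  | [] => []
  | e :: rest =>
    if e.2.1 = "PRODUCT" ∧ e.1 ∉ seen then e.1 :: opNames (seen ++ [e.1]) rest
    else opNames seen rest

theorem opNames_cons_new (seen : List String) (e : String × String × Int × Int)
    (rest : List (String × String × Int × Int)) (hp : e.2.1 = "PRODUCT") (hm : e.1 ∉ seen) :
    opNames seen (e :: rest) = e.1 :: opNames (seen ++ [e.1]) rest := by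
  rw [opNames, if_pos ⟨hp, hm⟩]

theorem opNames_cons_skip (seen : List String) (e : String × String × Int × Int)
    (rest : List (String × String × Int × Int)) (h : ¬ (e.2.1 = "PRODUCT" ∧ e.1 ∉ seen)) :
    opNames seen (e :: rest) = opNames seen rest := by
  rw [opNames, if_neg h]

theorem foldl_opNameStep (entities : List (String × String × Int × Int)) (ns : List String) :
    entities.foldl opNameStep ns = ns ++ opNames ns entities := by
  induction entities generalizing ns with
  | nil => simp [opNames]
  | cons e rest ih =>
    simp only [List.foldl_cons, opNameStep]
    by_cases h1 : e.2.1 = "PRODUCT"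
    · by_cases h2 : e.1 ∈ ns
      · rw [opNames_cons_skip _ _ _ (by simp [h2])]
        simp [h1, h2, ih]
      · rw [opNames_cons_new _ _ _ h1 h2]
        simp [h1, h2, ih, List.append_assoc]
    · rw [opNames_cons_skip _ _ _ (by simp [h1])]
      simp [h1, ih]

-- one insertion attempt of the indexing sweep
theorem get?_istep (line n m : String) (d : PySem.Dict String String) :
    PySem.Dict.get? (if PySem.Dict.get? d n = none ∧ PySem.Str.isIn n line then PySem.Dict.insert d n line else d) m =
      if m = n ∧ PySem.Dict.get? d m = none ∧ PySem.Str.isIn m line then some line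
      else PySem.Dict.get? d m := by
  by_cases hC : PySem.Dict.get? d n = none ∧ PySem.Str.isIn n line = true
  · rw [if_pos hC]
    by_cases hm : m = n
    · subst hm; rw [PySem.Dict.get?_insert_self, if_pos ⟨rfl, hC⟩]
    · rw [PySem.Dict.get?_insert_of_ne _ _ hm, if_neg (fun h => hm h.1)]
  · rw [if_neg hC]
    by_cases hm : m = n
    · subst hm; rw [if_neg (fun h => hC h.2)]
    · rw [if_neg (fun h => hm h.1)]

-- one line of the indexing sweep: effect on get?
theorem get?_opIndexStep (names : List String) (d : PySem.Dict String String) (line : String)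
    (m : String) :
    PySem.Dict.get? (opIndexStep names d line) m =
      if m ∈ names ∧ PySem.Dict.get? d m = none ∧ PySem.Str.isIn m line then some line
      else PySem.Dict.get? d m := by
  unfold opIndexStep
  induction names generalizing d with
  | nil => simp
  | cons n ns ih =>
    rw [List.foldl_cons, ih, get?_istep]
    by_cases hm : m = n
    · subst hm
      split_ifs <;> simp_all
    · split_ifs <;> simp_all

-- the whole sweep computes, for each name, the first line containing it
theorem get?_index (names : List String) (lines : List String) (d : PySem.Dict String String)
    (m : String) (hm : m ∈ names) :
    PySem.Dict.get? (lines.foldl (opIndexStep names) d) m =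
      (PySem.Dict.get? d m).or (lines.find? (fun line => PySem.Str.isIn m line)) := by
  induction lines generalizing d with
  | nil => simp
  | cons l ls ih =>
    rw [List.foldl_cons, ih, get?_opIndexStep]
    cases hd : PySem.Dict.get? d m with
    | some v => simp
    | none =>
      by_cases hin : PySem.Str.isIn m l = true
      · rw [if_pos ⟨hm, rfl, hin⟩, List.find?_cons_of_pos hin]
        simp
      · rw [if_neg (fun h => hin h.2.2), List.find?_cons_of_neg (by simpa using hin)]

-- B equals the canonical form: filterMap of find? over the deduplicated names
def opEmit (lines : List String) (n : String) : Option (List (String × String)) :=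
  (lines.find? (fun line => PySem.Str.isIn n line)).map
    (fun line => [("entity", n), ("full_line", line)])

theorem alt_eq_canonical (entities : List (String × String × Int × Int)) (original_text : String) :
    organize_products_alt entities original_text =
      (opNames [] entities).filterMap (opEmit (opLines original_text)) := by
  unfold organize_products_alt
  rw [foldl_opNameStep, List.nil_append]
  apply List.filterMap_congr
  intro n hn
  rw [get?_index _ _ _ _ hn, PySem.Dict.get?_empty, Option.none_or]
  rfl

-- fused A equals the canonical form; S = matched names seen so far, T = all names seen so far
theorem fused_eq_canonical (lines : List String) (entities : List (String × String × Int × Int))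
    (S : PySem.Set String) (out : List (List (String × String))) (T : List String)
    (hsub : ∀ n, n ∈ S → n ∈ T)
    (hunm : ∀ n, n ∈ T → n ∉ S →
      lines.find? (fun line => PySem.Str.isIn n line) = none) :
    (entities.foldl (opFused lines) (S, out)).2 =
      out ++ (opNames T entities).filterMap (opEmit lines) := by
  induction entities generalizing S out T with
  | nil => simp [opNames]
  | cons e rest ih =>
    rw [List.foldl_cons]
    by_cases hp : e.2.1 = "PRODUCT"
    · by_cases hT : e.1 ∈ T
      · rw [opNames_cons_skip _ _ _ (by simp [hT])]
        by_cases hS : e.1 ∈ S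
        · rw [opFused_skip _ _ _ (Or.inr (by simp [hS]))]
          exact ih S out T hsub hunm
        · rw [opFused_none _ _ _ hp (by simp [hS]) (hunm e.1 hT hS)]
          exact ih S out T hsub hunm
      · have hS : e.1 ∉ S := fun h => hT (hsub e.1 h)
        rw [opNames_cons_new _ _ _ hp hT]
        cases hfind : lines.find? (fun line => PySem.Str.isIn e.1 line) with
        | some line =>
          rw [opFused_found _ _ _ _ hp (by simp [hS]) hfind]
          rw [ih (PySem.Set.add S e.1) _ (T ++ [e.1])
            (fun n hn => by
              rcases (PySem.Set.mem_add _ _ _).1 hn with h | h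
              · exact List.mem_append.2 (Or.inl (hsub n h))
              · simp [h])
            (fun n hn hns => by
              rcases List.mem_append.1 hn with h | h
              · exact hunm n h (fun hc => hns ((PySem.Set.mem_add _ _ _).2 (Or.inl hc)))
              · exact absurd ((PySem.Set.mem_add _ _ _).2 (Or.inr (by simpa using h))) hns)]
          simp only [List.filterMap_cons, opEmit, hfind, Option.map_some]
          simp
        | none =>
          rw [opFused_none _ _ _ hp (by simp [hS]) hfind]
          rw [ih S out (T ++ [e.1])
            (fun n hn => List.mem_append.2 (Or.inl (hsub n hn)))
            (fun n hn hns => by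
              rcases List.mem_append.1 hn with h | h
              · exact hunm n h hns
              · simpa [(by simpa using h : n = e.1)] using hfind)]
          simp only [List.filterMap_cons, opEmit, hfind, Option.map_none]
    · rw [opFused_skip _ _ _ (Or.inl hp), opNames_cons_skip _ _ _ (by simp [hp])]
      exact ih S out T hsub hunm

-- ===== VERDICT (by name: the statement is the Claim_ definition above) =====
theorem organize_products_spec : Claim_equal_organize_products := by
  intro entities original_text _
  unfold Spec_organize_products organize_products
  rw [foldl_opStepA, List.nil_append, dedup_eq_fused, alt_eq_canonical]
  have h := fused_eq_canonical (opLines original_text) entities PySem.Set.empty [] []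
    (by intro n h; simp [PySem.Set.empty] at h)
    (by intro n h; simp at h)
  simpa using h
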